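-- pv_equiv track=rewrite | github.com/hongii/programmers_python | LV 3/연속 펄스 부분 수열의 합.py | solution
-- ===== SOURCE A (Python) =====
-- def solution(sequence):
--   minus_plus = [] # [-1, 1] 펄스수열 곱한 배열
--   plus_minus = [] # [1, -1] 펄스수열 곱한 배열
--   for i in range(1, len(sequence)+1):
--     if i % 2 == 0:
--         minus_plus.append(sequence[i-1])
--         plus_minus.append(sequence[i-1]*-1)
--     else:
--         minus_plus.append(sequence[i-1]*-1)
--         plus_minus.append(sequence[i-1])
--
--   dp_mp = [0]*(len(sequence)) # minus_plus배열의 최대 부분합 저장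
--   dp_pm = [0]*(len(sequence)) # plus_minus배열의 최대 부분합 저장
--   for i in range(len(sequence)): # 연속 수열의 최대 부분합 구하기
--       dp_mp[i] = max(0, dp_mp[i-1]) + minus_plus[i]
--       dp_pm[i] = max(0, dp_pm[i-1]) + plus_minus[i]
--
--   return max(max(dp_mp), max(dp_pm))
-- ===== SOURCE B (Python) =====
-- def solution(sequence):
--     # One pass over prefix sums of the pulse-transformed sequence:
--     # candidate at j = max(P[j]-min_prefix, max_prefix-P[j]).
--     p = minpre = maxpre = 0
--     cands = []
--     for j, x in enumerate(sequence, 1):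
--         p += x if j % 2 == 0 else -x
--         cands.append(max(p - minpre, maxpre - p))
--         if p < minpre:
--             minpre = p
--         if p > maxpre:
--             maxpre = p
--     return max(cands)
-- ===== Notes on version B (the rewrite author's own statement) =====
-- stated objective: faster
-- what changed: Replaced the two materialized pulse arrays plus two Kadane DP arrays with a single pass over prefix sums of the pulse-transformed sequence, tracking running min/max prefix values; the candidate at each position is max(P[j]-minpre, maxpre-P[j]), whose maximum equals the larger of the two Kadane results because the two pulse arrays are negations of each other.
import Mathlib
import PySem

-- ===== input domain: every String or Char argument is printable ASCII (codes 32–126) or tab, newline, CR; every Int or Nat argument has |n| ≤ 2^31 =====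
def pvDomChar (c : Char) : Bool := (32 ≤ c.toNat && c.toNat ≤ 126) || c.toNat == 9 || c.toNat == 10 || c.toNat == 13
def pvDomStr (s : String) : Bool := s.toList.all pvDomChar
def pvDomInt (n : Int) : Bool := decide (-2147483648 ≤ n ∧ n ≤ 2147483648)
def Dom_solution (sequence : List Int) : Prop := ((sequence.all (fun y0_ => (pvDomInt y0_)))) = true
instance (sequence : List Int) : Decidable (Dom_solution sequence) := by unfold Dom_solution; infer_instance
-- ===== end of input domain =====

def solution (sequence : List Int) : Int :=
  let n := sequence.length
  let st1 :=
    (PySem.List.pyRange 1 ((n : Int) + 1) 1).foldl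
      (fun (st : List Int × List Int) i =>
        -- sequence[i-1]: index always in range for i ∈ range(1, n+1)
        let x := PySem.List.pyGetD sequence (i - 1) 0
        if PySem.Int.mod i 2 = 0 then (st.1 ++ [x], st.2 ++ [x * (-1)])
        else (st.1 ++ [x * (-1)], st.2 ++ [x]))
      ([], [])
  let minus_plus := st1.1
  let plus_minus := st1.2
  let st2 :=
    (PySem.List.pyRange 0 (n : Int) 1).foldl
      (fun (st : List Int × List Int) i =>
        let v1 := max 0 (PySem.List.pyGetD st.1 (i - 1) 0) + PySem.List.pyGetD minus_plus i 0
        let v2 := max 0 (PySem.List.pyGetD st.2 (i - 1) 0) + PySem.List.pyGetD plus_minus i 0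
        (PySem.List.pySetD st.1 i v1, PySem.List.pySetD st.2 i v2))
      (List.replicate n (0 : Int), List.replicate n (0 : Int))
  -- max() of an empty list raises ValueError: the empty sequence is excluded by Pre_
  max ((PySem.List.max? st2.1 (fun y => y)).getD 0) ((PySem.List.max? st2.2 (fun y => y)).getD 0)

-- ===== PORT B =====
def solution_alt (sequence : List Int) : Int :=
  let st :=
    (PySem.List.enumerate sequence 1).foldl
      (fun (st : Int × Int × Int × List Int) jx =>
        let p0 := st.1; let minpre := st.2.1; let maxpre := st.2.2.1; let cands := st.2.2.2
        let j := jx.1; let x := jx.2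
        let p := p0 + (if PySem.Int.mod j 2 = 0 then x else -x)
        let cands := cands ++ [max (p - minpre) (maxpre - p)]
        let minpre := if p < minpre then p else minpre
        let maxpre := if p > maxpre then p else maxpre
        (p, minpre, maxpre, cands))
      (0, 0, 0, [])
  -- max() of an empty list raises ValueError: the empty sequence is excluded by Pre_
  (PySem.List.max? st.2.2.2 (fun y => y)).getD 0

-- ===== PRECONDITION & SPEC =====
-- Pre_ excludes only the empty list, on which Python's max() raises ValueError in A (and in B).
def Pre_solution (sequence : List Int) : Prop := sequence ≠ []
instance (sequence : List Int) : Decidable (Pre_solution sequence) := by unfold Pre_solution; infer_instance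
def pvWitness_solution : List Int := [2, 3, -6, 1, 3, -1, 2, 4]

def Spec_solution (sequence : List Int) (out : Int) : Prop := out = solution_alt sequence
instance (sequence : List Int) (out : Int) : Decidable (Spec_solution sequence out) := by unfold Spec_solution; infer_instance

-- ===== CLAIM (what is proved, stated in full; the proofs are below) =====
def Claim_equal_solution : Prop := ∀ (sequence : List Int), Dom_solution sequence → Pre_solution sequence → Spec_solution sequence (solution sequence)

-- ===== LEMMAS AND PROOFS =====

-- sign applied by the pulse at (1-based) position j: minus_plus element
def sgn (j : Int) (x : Int) : Int := if PySem.Int.mod j 2 = 0 then x else -x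

-- pulse-transformed sequence, counter starting at j
def tseq (j : Int) : List Int → List Int
  | [] => []
  | x :: l => sgn j x :: tseq (j + 1) l

-- Kadane chain: kadGo prev l lists the dp values
def kadGo (prev : Int) : List Int → List Int
  | [] => []
  | a :: l => (max 0 prev + a) :: kadGo (max 0 prev + a) l

theorem tseq_length (j : Int) (l : List Int) : (tseq j l).length = l.length := by
  induction l generalizing j with
  | nil => rfl
  | cons x l ih => simp [tseq, ih]

theorem tseq_snoc (j : Int) (l : List Int) (y : Int) :
    tseq j (l ++ [y]) = tseq j l ++ [sgn (j + l.length) y] := by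
  induction l generalizing j with
  | nil => simp [tseq]
  | cons x l ih => simp [tseq, ih]; ring_nf

theorem kadGo_length (p : Int) (l : List Int) : (kadGo p l).length = l.length := by
  induction l generalizing p with
  | nil => rfl
  | cons a l ih => simp [kadGo, ih]

theorem kadGo_congr {p q : Int} (h : max 0 p = max 0 q) (l : List Int) :
    kadGo p l = kadGo q l := by
  cases l with
  | nil => rfl
  | cons a l => simp [kadGo, h]

theorem kadGo_snoc (p : Int) (l : List Int) (a : Int) :
    kadGo p (l ++ [a]) = kadGo p l ++ [max 0 ((kadGo p l).getLastD p) + a] := by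
  induction l generalizing p with
  | nil => simp [kadGo]
  | cons b l ih =>
      simp only [List.cons_append, kadGo, ih, List.getLastD_cons]

-- A's first loop builds the pulse-transformed list and its negation
theorem loopA1 (sequence : List Int) (k : Nat) (hk : k ≤ sequence.length) :
    (PySem.List.pyRange 1 ((k : Int) + 1) 1).foldl
      (fun (st : List Int × List Int) i =>
        let x := PySem.List.pyGetD sequence (i - 1) 0
        if PySem.Int.mod i 2 = 0 then (st.1 ++ [x], st.2 ++ [x * (-1)])
        else (st.1 ++ [x * (-1)], st.2 ++ [x]))
      ([], [])
    = (tseq 1 (sequence.take k), (tseq 1 (sequence.take k)).map (fun y => -y)) := by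
  induction k with
  | zero => simp [PySem.List.pyRange_one_eq_nil, tseq]
  | succ m ih =>
      have hm : m ≤ sequence.length := Nat.le_of_succ_le hk
      have hrange : PySem.List.pyRange 1 ((↑(m+1) : Int) + 1) 1
          = PySem.List.pyRange 1 ((m : Int) + 1) 1 ++ [(m : Int) + 1] := by
        push_cast
        exact PySem.List.pyRange_one_succ_right (by omega)
      rw [hrange, List.foldl_append, ih hm]
      have hx : PySem.List.pyGetD sequence ((m : Int) + 1 - 1) 0 = sequence[m]'(by omega) := by
        have : (m : Int) + 1 - 1 = (m : Int) := by ring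
        rw [this, PySem.List.pyGetD_natCast]
        exact List.getD_eq_getElem _ _ (by omega)
      have htake : sequence.take (m+1) = sequence.take m ++ [sequence[m]'(by omega)] := by
        rw [List.take_succ]
        simp [List.getElem?_eq_getElem (by omega : m < sequence.length)]
      have hlen : ((sequence.take m).length : Int) = (m : Int) := by
        simp [List.length_take, Nat.min_eq_left hm]
      simp only [List.foldl_cons, List.foldl_nil, hx]
      rw [htake, tseq_snoc, hlen]
      simp only [sgn, PySem.Int.mod_eq_zero_iff_dvd, add_comm 1 (m : Int)]
      split_ifs with h <;> simp [mul_comm]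


-- one Kadane step of A's dp loop on a single component
theorem stepOne (A : List Int) (k : Nat) (hk : k < A.length) :
    PySem.List.pySetD (kadGo 0 (A.take k) ++ List.replicate (A.length - k) 0) (k : Int)
      (max 0 (PySem.List.pyGetD (kadGo 0 (A.take k) ++ List.replicate (A.length - k) 0) ((k : Int) - 1) 0)
        + PySem.List.pyGetD A (k : Int) 0)
    = kadGo 0 (A.take (k + 1)) ++ List.replicate (A.length - (k + 1)) 0 := by
  have hlenk : (kadGo 0 (A.take k)).length = k := by
    rw [kadGo_length, List.length_take]; omega
  have hxA : PySem.List.pyGetD A (k : Int) 0 = A[k]'hk := by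
    rw [PySem.List.pyGetD_natCast]; exact List.getD_eq_getElem _ _ hk
  have hprev : PySem.List.pyGetD (kadGo 0 (A.take k) ++ List.replicate (A.length - k) 0) ((k : Int) - 1) 0
      = (kadGo 0 (A.take k)).getLastD 0 := by
    cases k with
    | zero =>
        have hne : kadGo 0 (A.take 0) ++ List.replicate (A.length - 0) 0 ≠ [] := by
          simp [kadGo, List.replicate_eq_nil_iff]
          exact List.ne_nil_of_length_pos hk
        rw [show ((0 : Nat) : Int) - 1 = (-1 : Int) by ring, PySem.List.pyGetD_neg_one _ _ hne]
        simp [kadGo, List.getLast_replicate]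
    | succ m =>
        have hml : m < (kadGo 0 (A.take (m+1))).length := by
          rw [kadGo_length, List.length_take]; omega
        rw [show ((((m : Nat) + 1 : Nat)) : Int) - 1 = ((m : Nat) : Int) by push_cast; ring,
          PySem.List.pyGetD_natCast, List.getD_eq_getElem _ _ (by simp [hlenk]; omega),
          List.getElem_append_left (by omega)]
        have hne : kadGo 0 (A.take (m+1)) ≠ [] := by
          intro h; rw [h] at hlenk; simp at hlenk
        have hD : (kadGo 0 (A.take (m+1))).getLastD 0 = (kadGo 0 (A.take (m+1))).getLast hne := by
          rw [List.getLastD_eq_getLast?, List.getLast?_eq_some_getLast hne]; rfl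
        rw [hD, List.getLast_eq_getElem]
        congr 1
        omega
  rw [hprev, hxA, PySem.List.pySetD_natCast]
  have hrep : List.replicate (A.length - k) (0 : Int) = 0 :: List.replicate (A.length - (k+1)) 0 := by
    rw [show A.length - k = (A.length - (k+1)) + 1 by omega, List.replicate_succ]
  have htake : A.take (k+1) = A.take k ++ [A[k]'hk] := by
    rw [List.take_add_one]
    simp [List.getElem?_eq_getElem hk]
  rw [hrep, htake, kadGo_snoc]
  rw [show (kadGo 0 (A.take k)).getLastD 0 = (kadGo 0 (A.take k)).getLastD 0 from rfl]
  rw [List.set_append_right _ _ (by omega)]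
  simp [hlenk]

-- A's dp loop computes the two Kadane chains
theorem loopA2 (A B : List Int) (n : Nat) (hA : A.length = n) (hB : B.length = n)
    (k : Nat) (hk : k ≤ n) :
    (PySem.List.pyRange 0 (k : Int) 1).foldl
      (fun (st : List Int × List Int) i =>
        let v1 := max 0 (PySem.List.pyGetD st.1 (i - 1) 0) + PySem.List.pyGetD A i 0
        let v2 := max 0 (PySem.List.pyGetD st.2 (i - 1) 0) + PySem.List.pyGetD B i 0
        (PySem.List.pySetD st.1 i v1, PySem.List.pySetD st.2 i v2))
      (List.replicate n (0 : Int), List.replicate n (0 : Int))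
    = (kadGo 0 (A.take k) ++ List.replicate (n - k) 0,
       kadGo 0 (B.take k) ++ List.replicate (n - k) 0) := by
  induction k with
  | zero => simp [PySem.List.pyRange_one_eq_nil, kadGo]
  | succ m ih =>
      have hrange : PySem.List.pyRange 0 ((↑(m+1) : Int)) 1
          = PySem.List.pyRange 0 ((m : Int)) 1 ++ [(m : Int)] := by
        push_cast
        exact PySem.List.pyRange_one_succ_right (by omega)
      rw [hrange, List.foldl_append, ih (by omega)]
      simp only [List.foldl_cons, List.foldl_nil]
      have h1 := stepOne A m (by omega)
      have h2 := stepOne B m (by omega)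
      rw [hA] at h1; rw [hB] at h2
      exact Prod.ext (by exact h1) (by exact h2)

-- B's single pass produces the pointwise max of the two Kadane chains
theorem loopB (l : List Int) (j p minp maxp : Int) (cs : List Int)
    (h1 : minp ≤ p) (h2 : p ≤ maxp) :
    ((PySem.List.enumerate l j).foldl
      (fun (st : Int × Int × Int × List Int) jx =>
        let p0 := st.1; let minpre := st.2.1; let maxpre := st.2.2.1; let cands := st.2.2.2
        let j := jx.1; let x := jx.2
        let p := p0 + (if PySem.Int.mod j 2 = 0 then x else -x)
        let cands := cands ++ [max (p - minpre) (maxpre - p)]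
        let minpre := if p < minpre then p else minpre
        let maxpre := if p > maxpre then p else maxpre
        (p, minpre, maxpre, cands))
      (p, minp, maxp, cs)).2.2.2
    = cs ++ List.zipWith max (kadGo (p - minp) (tseq j l))
        (kadGo (maxp - p) ((tseq j l).map (fun y => -y))) := by
  induction l generalizing j p minp maxp cs with
  | nil => simp [PySem.List.enumerate_nil, tseq, kadGo]
  | cons x l ih =>
      rw [PySem.List.enumerate_cons, List.foldl_cons]
      dsimp only
      rw [ih _ _ _ _ _ (by split_ifs <;> omega) (by split_ifs <;> omega)]
      have hA : (if PySem.Int.mod j 2 = 0 then x else -x) = sgn j x := rfl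
      simp only [tseq, List.map_cons, kadGo, hA]
      have e1 : max 0 (p - minp) = p - minp := by omega
      have e2 : max 0 (maxp - p) = maxp - p := by omega
      rw [e1, e2]
      have c1 : kadGo ((p + sgn j x) - (if p + sgn j x < minp then p + sgn j x else minp))
          (tseq (j+1) l) = kadGo (p - minp + sgn j x) (tseq (j+1) l) :=
        kadGo_congr (by split_ifs <;> omega) _
      have c2 : kadGo ((if p + sgn j x > maxp then p + sgn j x else maxp) - (p + sgn j x))
          ((tseq (j+1) l).map (fun y => -y)) = kadGo (maxp - p + -sgn j x) ((tseq (j+1) l).map (fun y => -y)) :=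
        kadGo_congr (by split_ifs <;> omega) _
      rw [c1, c2, List.zipWith_cons_cons]
      rw [show max (p + sgn j x - minp) (maxp - (p + sgn j x))
            = max (p - minp + sgn j x) (maxp - p + -sgn j x) by ring_nf]
      simp

theorem foldl_max_zip (t1 : List Int) : ∀ (t2 : List Int), t1.length = t2.length → ∀ (x y : Int),
    (List.zipWith max t1 t2).foldl max (max x y) = max (t1.foldl max x) (t2.foldl max y) := by
  induction t1 with
  | nil =>
      intro t2 h x y
      cases t2 with
      | nil => simp
      | cons b t2 => simp at h
  | cons a t1 ih =>
      intro t2 h x y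
      cases t2 with
      | nil => simp at h
      | cons b t2 =>
          simp only [List.zipWith_cons_cons, List.foldl_cons]
          rw [show max (max x y) (max a b) = max (max x a) (max y b) by omega]
          exact ih t2 (by simpa using h) _ _

theorem maxD_zip (l1 l2 : List Int) (hne : l1 ≠ []) (hlen : l1.length = l2.length) :
    (PySem.List.max? (List.zipWith max l1 l2) (fun y => y)).getD 0
    = max ((PySem.List.max? l1 (fun y => y)).getD 0) ((PySem.List.max? l2 (fun y => y)).getD 0) := by
  cases l1 with
  | nil => exact absurd rfl hne
  | cons x t1 =>
  cases l2 with
  | nil => simp at hlen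
  | cons y t2 =>
      rw [List.zipWith_cons_cons, PySem.List.max?_id_cons, PySem.List.max?_id_cons,
        PySem.List.max?_id_cons]
      simp only [Option.getD_some]
      exact foldl_max_zip t1 t2 (by simpa using hlen) x y

theorem solution_spec : Claim_equal_solution := by
  intro seq hdom hpre
  have eqA : solution seq
      = max ((PySem.List.max? (kadGo 0 (tseq 1 seq)) (fun y => y)).getD 0)
            ((PySem.List.max? (kadGo 0 ((tseq 1 seq).map (fun y => -y))) (fun y => y)).getD 0) := by
    unfold solution
    dsimp only
    rw [loopA1 seq seq.length (le_refl _), List.take_length]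
    dsimp only
    rw [loopA2 (tseq 1 seq) ((tseq 1 seq).map (fun y => -y)) seq.length
      (tseq_length 1 seq) (by simp [tseq_length]) seq.length (le_refl _)]
    simp [List.take_of_length_le, tseq_length]
  have eqB : solution_alt seq
      = (PySem.List.max? (List.zipWith max (kadGo 0 (tseq 1 seq))
          (kadGo 0 ((tseq 1 seq).map (fun y => -y)))) (fun y => y)).getD 0 := by
    unfold solution_alt
    dsimp only
    rw [loopB seq 1 0 0 0 [] (le_refl _) (le_refl _)]
    simp
  have hne : kadGo 0 (tseq 1 seq) ≠ [] := by
    intro h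
    have := kadGo_length 0 (tseq 1 seq)
    rw [h] at this
    simp [tseq_length] at this
    exact hpre (List.eq_nil_of_length_eq_zero this.symm)
  unfold Spec_solution
  rw [eqA, eqB, maxD_zip _ _ hne (by simp [kadGo_length, tseq_length])]
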